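-- pv_equiv track=rewrite | github.com/Decl001/Exploring-the-News-Coverage-of-Electronic-Health-Records | TAGME_Annotation.py | addFilteredOrgsToDict
-- ===== SOURCE A (Python) =====
-- def addFilteredOrgsToDict(filteredResults, resultDict, yearPos):
--     for result in filteredResults:
--         if result in resultDict:
--             resultDict[result][yearPos] +=1
--         else:
--             resultDict[result] = [0,0,0,0,0,0,0,0,0,0,0,0,0,0,0,0,0,0,0,0,0]
--             resultDict[result][yearPos] +=1
--     return resultDict
-- ===== SOURCE B (Python) =====
-- def addFilteredOrgsToDict(filteredResults, resultDict, yearPos):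
--     # Count-first restructuring: build a frequency table of the occurrences,
--     # then add each key's total in one step instead of incrementing per element.
--     counts = {}
--     for r in filteredResults:
--         counts[r] = counts.get(r, 0) + 1
--     for k, v in resultDict.items():
--         n = counts.pop(k, 0)
--         if n != 0:
--             v[yearPos] += n
--     for k, n in counts.items():
--         row = [0] * 21
--         row[yearPos] = n
--         resultDict[k] = row
--     return resultDict
-- ===== Notes on version B (the rewrite author's own statement) =====
-- stated objective: alternative
-- what changed: B first builds a frequency table of filteredResults, then updates each existing dict entry once with its total count and appends one pre-filled 21-slot row per remaining unique new key, instead of A's per-element increment loop.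
import Mathlib
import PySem

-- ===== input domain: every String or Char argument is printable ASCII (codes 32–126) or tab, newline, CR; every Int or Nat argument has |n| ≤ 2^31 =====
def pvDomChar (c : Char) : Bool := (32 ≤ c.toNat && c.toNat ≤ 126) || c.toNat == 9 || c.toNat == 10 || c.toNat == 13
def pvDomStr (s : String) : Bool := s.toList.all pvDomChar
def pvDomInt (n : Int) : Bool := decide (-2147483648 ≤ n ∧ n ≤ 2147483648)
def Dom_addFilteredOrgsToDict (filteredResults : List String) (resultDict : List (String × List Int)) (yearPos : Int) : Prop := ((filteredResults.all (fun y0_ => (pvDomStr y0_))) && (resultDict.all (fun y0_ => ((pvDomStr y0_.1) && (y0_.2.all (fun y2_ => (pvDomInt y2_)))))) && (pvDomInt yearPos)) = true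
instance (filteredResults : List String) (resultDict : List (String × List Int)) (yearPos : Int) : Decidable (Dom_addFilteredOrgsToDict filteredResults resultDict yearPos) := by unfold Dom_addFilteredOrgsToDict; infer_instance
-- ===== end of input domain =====

-- B counts the occurrences first and then adds each key's total in one step (one pass over
-- unique keys), instead of A's per-element increment loop; objective: alternative decomposition.
-- Both A and B mutate resultDict (and its value lists) in place in Python; the equivalence
-- proved here is about the returned value.

-- ===== PORT A =====
def addFilteredOrgsToDict (filteredResults : List String) (resultDict : List (String × List Int)) (yearPos : Int) : List (String × List Int) :=
  (filteredResults.foldl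
    (fun d result =>
      if PySem.Dict.contains d result then
        PySem.Dict.modify d result []
          (fun v => PySem.List.pySetD v yearPos (PySem.List.pyGetD v yearPos 0 + 1))
      else
        PySem.Dict.modify
          (PySem.Dict.insert d result [0,0,0,0,0,0,0,0,0,0,0,0,0,0,0,0,0,0,0,0,0]) result []
          (fun v => PySem.List.pySetD v yearPos (PySem.List.pyGetD v yearPos 0 + 1)))
    (PySem.Dict.mk resultDict)).items

-- ===== PORT B =====
-- second loop of Source B: for (k, v) in resultDict.items(): n = counts.pop(k, 0); if n != 0: v[yearPos] += n
def pvPhase2 (c : PySem.Dict String Int) (rd : List (String × List Int)) (i : Int) :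
    PySem.Dict String Int × List (String × List Int) :=
  match rd with
  | [] => (c, [])
  | p :: t =>
      let n := PySem.Dict.getD c p.1 0
      let c1 := PySem.Dict.erase c p.1
      let v' := if n ≠ 0 then PySem.List.pySetD p.2 i (PySem.List.pyGetD p.2 i 0 + n) else p.2
      let rest := pvPhase2 c1 t i
      (rest.1, (p.1, v') :: rest.2)

def addFilteredOrgsToDict_alt (filteredResults : List String) (resultDict : List (String × List Int)) (yearPos : Int) : List (String × List Int) :=
  -- counts = {}; for r in filteredResults: counts[r] = counts.get(r, 0) + 1
  let counts := filteredResults.foldl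
    (fun c r => PySem.Dict.insert c r (PySem.Dict.getD c r 0 + 1)) PySem.Dict.empty
  let st := pvPhase2 counts resultDict yearPos
  -- for k, n in counts.items(): row = [0]*21; row[yearPos] = n; resultDict[k] = row
  st.2 ++ st.1.items.map
    (fun kn => (kn.1, PySem.List.pySetD (List.replicate 21 0) yearPos kn.2))

-- ===== PRECONDITION & SPEC =====
-- Pre_ excludes (a) inputs where A raises IndexError: yearPos out of range for the 21-slot row of
-- some newly seen org, or for the stored row of an org that occurs in filteredResults; and
-- (b) resultDict association lists with duplicate keys, which do not represent a Python dict
-- (A's argument is a real dict, so such inputs never reach A).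
def Pre_addFilteredOrgsToDict (filteredResults : List String) (resultDict : List (String × List Int)) (yearPos : Int) : Prop :=
  (resultDict.map Prod.fst).Nodup ∧
  (∀ p ∈ resultDict, p.1 ∈ filteredResults → PySem.Raise.InRange p.2.length yearPos) ∧
  (∀ r ∈ filteredResults, r ∉ resultDict.map Prod.fst → PySem.Raise.InRange 21 yearPos)
instance (filteredResults : List String) (resultDict : List (String × List Int)) (yearPos : Int) : Decidable (Pre_addFilteredOrgsToDict filteredResults resultDict yearPos) := by
  unfold Pre_addFilteredOrgsToDict PySem.Raise.InRange; infer_instance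

def pvWitness_addFilteredOrgsToDict : List String × (List (String × List Int)) × Int :=
  (["acme", "beta", "acme"], [("beta", [0,0,0,0,0,0,0,0,0,0,0,0,0,0,0,0,0,0,0,0,0])], 3)

def Spec_addFilteredOrgsToDict (filteredResults : List String) (resultDict : List (String × List Int)) (yearPos : Int) (out : List (String × List Int)) : Prop := out = addFilteredOrgsToDict_alt filteredResults resultDict yearPos
instance (filteredResults : List String) (resultDict : List (String × List Int)) (yearPos : Int) (out : List (String × List Int)) : Decidable (Spec_addFilteredOrgsToDict filteredResults resultDict yearPos out) := by unfold Spec_addFilteredOrgsToDict; infer_instance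

-- ===== CLAIM (what is proved, stated in full; the proofs are below) =====
def Claim_equal_addFilteredOrgsToDict : Prop := ∀ (filteredResults : List String) (resultDict : List (String × List Int)) (yearPos : Int), Dom_addFilteredOrgsToDict filteredResults resultDict yearPos → Pre_addFilteredOrgsToDict filteredResults resultDict yearPos → Spec_addFilteredOrgsToDict filteredResults resultDict yearPos (addFilteredOrgsToDict filteredResults resultDict yearPos)

-- ===== LEMMAS AND PROOFS =====

-- A's per-element step (definitionally the foldl body of port A)
def pvStepA (yearPos : Int) (d : PySem.Dict String (List Int)) (result : String) : PySem.Dict String (List Int) :=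
  if PySem.Dict.contains d result then
    PySem.Dict.modify d result []
      (fun v => PySem.List.pySetD v yearPos (PySem.List.pyGetD v yearPos 0 + 1))
  else
    PySem.Dict.modify
      (PySem.Dict.insert d result [0,0,0,0,0,0,0,0,0,0,0,0,0,0,0,0,0,0,0,0,0]) result []
      (fun v => PySem.List.pySetD v yearPos (PySem.List.pyGetD v yearPos 0 + 1))


-- B's whole body for a given counter
def pvApplyB (c : PySem.Dict String Int) (rd : List (String × List Int)) (i : Int) : List (String × List Int) :=
  (pvPhase2 c rd i).2 ++ (pvPhase2 c rd i).1.items.map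
    (fun kn => (kn.1, PySem.List.pySetD (List.replicate 21 0) i kn.2))


-- the per-entry update of B's second loop, with the counter fixed
def pvUpd (i : Int) (c : PySem.Dict String Int) (p : String × List Int) : String × List Int :=
  (p.1, if PySem.Dict.getD c p.1 0 ≠ 0
        then PySem.List.pySetD p.2 i (PySem.List.pyGetD p.2 i 0 + PySem.Dict.getD c p.1 0)
        else p.2)


theorem pv_get?_erase_of_ne (c : PySem.Dict String Int) (k j : String) (h : j ≠ k) :
    (c.erase k).get? j = c.get? j := by
  rcases c with ⟨l⟩
  induction l with
  | nil => rfl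
  | cons q t ih =>
    simp only [PySem.Dict.erase, PySem.Dict.get?] at *
    by_cases hq : q.1 = k
    · rw [List.filter_cons_of_neg (by simp [hq])]
      rw [List.find?_cons_of_neg (by simp [hq, Ne.symm h])]
      exact ih
    · rw [List.filter_cons_of_pos (by simp [hq])]
      by_cases hj : q.1 = j
      · rw [List.find?_cons_of_pos (by simp [hj]), List.find?_cons_of_pos (by simp [hj])]
      · rw [List.find?_cons_of_neg (by simp [hj]), List.find?_cons_of_neg (by simp [hj])]
        exact ih


theorem pvPhase2_eq (c : PySem.Dict String Int) (rd : List (String × List Int)) (i : Int)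
    (hnd : (rd.map Prod.fst).Nodup) :
    pvPhase2 c rd i =
      (PySem.Dict.mk (c.items.filter (fun q => !(rd.map Prod.fst).contains q.1)),
       rd.map (pvUpd i c)) := by
  induction rd generalizing c with
  | nil => simp [pvPhase2]
  | cons p t ih =>
    simp only [List.map_cons, List.nodup_cons, List.mem_map] at hnd
    obtain ⟨hp, hndt⟩ := hnd
    rw [pvPhase2]
    rw [ih (c.erase p.1) hndt]
    dsimp only
    simp only [Prod.mk.injEq]
    constructor
    · -- dict component
      congr 1
      rcases c with ⟨l⟩
      simp only [PySem.Dict.erase, List.filter_filter]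
      apply List.filter_congr
      intro q _
      simp only [List.map_cons, List.contains_cons]
      by_cases h1 : q.1 = p.1 <;> simp [h1, Bool.and_comm]
    · -- list component
      rw [List.map_cons]
      refine congrArg₂ List.cons rfl ?_
      apply List.map_congr_left
      intro q hq
      have hne : q.1 ≠ p.1 := by
        intro he; exact hp ⟨q, hq, he⟩ |>.elim
      unfold pvUpd
      rw [show (PySem.Dict.getD (c.erase p.1) q.1 0) = PySem.Dict.getD c q.1 0 by
        simp only [PySem.Dict.getD]; rw [pv_get?_erase_of_ne c p.1 q.1 hne]]



theorem pv_idx (len : Nat) (i : Int) (h : PySem.Raise.InRange len i) :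
    ∃ m : Nat, PySem.List.pyIdx? len i = some m ∧ m < len := by
  obtain ⟨h1, h2⟩ := h
  unfold PySem.List.pyIdx?
  by_cases ha : 0 ≤ i
  · rw [if_pos ha, if_pos h2]
    exact ⟨i.toNat, rfl, by omega⟩
  · rw [if_neg ha, if_pos (by omega : -(len:Int) ≤ i)]
    exact ⟨len - (-i).toNat, rfl, by omega⟩


theorem pv_setD_set {α : Type} (xs : List α) (i : Int) (h : PySem.Raise.InRange xs.length i) (v : α) :
    ∃ m : Nat, m < xs.length ∧ PySem.List.pySetD xs i v = xs.set m v ∧ PySem.List.pyIdx? xs.length i = some m := by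
  obtain ⟨m, hm, hlt⟩ := pv_idx xs.length i h
  exact ⟨m, hlt, by simp [PySem.List.pySetD, PySem.List.pySet?, hm], hm⟩


theorem pv_get_set (xs : List Int) (i : Int) (h : PySem.Raise.InRange xs.length i) (a : Int) :
    PySem.List.pyGetD (PySem.List.pySetD xs i a) i 0 = a := by
  obtain ⟨m, hlt, hset, hm⟩ := pv_setD_set xs i h a
  rw [hset]
  simp [PySem.List.pyGetD, PySem.List.pyGet?, hm, List.getElem?_set_self hlt]


theorem pv_set_set (xs : List Int) (i : Int) (h : PySem.Raise.InRange xs.length i) (a b : Int) :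
    PySem.List.pySetD (PySem.List.pySetD xs i a) i b = PySem.List.pySetD xs i b := by
  obtain ⟨m, hlt, hset, hm⟩ := pv_setD_set xs i h a
  have h2 : PySem.Raise.InRange (xs.set m a).length i := by simpa using h
  obtain ⟨m', hlt', hset', hm'⟩ := pv_setD_set (xs.set m a) i h2 b
  simp only [List.length_set] at hm'
  rw [hm] at hm'
  obtain rfl := Option.some.inj hm'
  obtain ⟨m2, hlt2, hset2, hm2⟩ := pv_setD_set xs i h b
  rw [hm] at hm2
  obtain rfl := Option.some.inj hm2
  rw [hset, hset', hset2, List.set_set]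


theorem pv_get_zeros (i : Int) (h : PySem.Raise.InRange 21 i) :
    PySem.List.pyGetD (List.replicate 21 (0:Int)) i 0 = 0 := by
  obtain ⟨m, hm, hlt⟩ := pv_idx 21 i h
  simp only [PySem.List.pyGetD, PySem.List.pyGet?, List.length_replicate, hm, Option.bind]
  simp [hlt]
  interval_cases m <;> rfl



theorem pv_key_inj {β : Type} (l : List (String × β)) (h : (l.map Prod.fst).Nodup) :
    ∀ p ∈ l, ∀ q ∈ l, p.1 = q.1 → p = q := by
  induction l with
  | nil => intro p hp; simp at hp
  | cons a t ih =>
    simp only [List.map_cons, List.nodup_cons] at h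
    obtain ⟨ha, ht⟩ := h
    intro p hp q hq he
    rcases List.mem_cons.mp hp with rfl | hp' <;> rcases List.mem_cons.mp hq with rfl | hq'
    · rfl
    · exfalso; apply ha; rw [he]; exact List.mem_map_of_mem hq'
    · exfalso; apply ha; rw [← he]; exact List.mem_map_of_mem hp'
    · exact ih ht p hp' q hq' he


theorem pv_filter_map_comm {β : Type} (l : List (String × β)) (P : String → Bool) (r : String) (w : β) :
    (l.map (fun q => if q.1 == r then (r, w) else q)).filter (fun q => P q.1)
      = (l.filter (fun q => P q.1)).map (fun q => if q.1 == r then (r, w) else q) := by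
  induction l with
  | nil => rfl
  | cons a t ih =>
    simp only [List.map_cons]
    by_cases hk : (a.1 == r) = true
    · rw [if_pos hk]
      have hk' : a.1 = r := by simpa using hk
      by_cases hP : P a.1 = true
      · rw [List.filter_cons_of_pos (by simpa [← hk'] using hP),
          List.filter_cons_of_pos (by simpa using hP), List.map_cons, if_pos hk, ih]
      · rw [List.filter_cons_of_neg (by simpa [← hk'] using hP),
          List.filter_cons_of_neg (by simpa using hP), ih]
    · rw [if_neg hk]
      by_cases hP : P a.1 = true
      · rw [List.filter_cons_of_pos (by simpa using hP),
          List.filter_cons_of_pos (by simpa using hP), List.map_cons, if_neg hk, ih]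
      · rw [List.filter_cons_of_neg (by simpa using hP),
          List.filter_cons_of_neg (by simpa using hP), ih]



theorem pv_step (c : PySem.Dict String Int) (rd : List (String × List Int)) (i : Int) (r : String)
    (hnd : (rd.map Prod.fst).Nodup) (hcnd : c.keys.Nodup) (hc : 0 ≤ c.getD r 0)
    (hin : ∀ p ∈ rd, p.1 = r → PySem.Raise.InRange p.2.length i)
    (hout : r ∉ rd.map Prod.fst → PySem.Raise.InRange 21 i) :
    (pvStepA i (PySem.Dict.mk (pvApplyB c rd i)) r).items
      = pvApplyB (c.modify r 0 (· + 1)) rd i := by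
  classical
  have hApp : ∀ c0 : PySem.Dict String Int, pvApplyB c0 rd i
      = rd.map (pvUpd i c0) ++ ((c0.items.filter (fun q => !(rd.map Prod.fst).contains q.1)).map
          (fun kn => (kn.1, PySem.List.pySetD (List.replicate 21 0) i kn.2))) := by
    intro c0; unfold pvApplyB; rw [pvPhase2_eq c0 rd i hnd]
  set K := rd.map Prod.fst with hKdef
  set row : String × Int → String × List Int :=
    fun kn => (kn.1, PySem.List.pySetD (List.replicate 21 0) i kn.2) with hrowdef
  set F := c.items.filter (fun q => !K.contains q.1) with hFdef
  set L := rd.map (pvUpd i c) ++ F.map row with hLdef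
  have hAppc : pvApplyB c rd i = L := hApp c
  have hkeysL : (PySem.Dict.mk L).keys = L.map Prod.fst := rfl
  have hLkeys : L.map Prod.fst = K ++ F.map Prod.fst := by
    rw [hLdef, List.map_append, List.map_map, List.map_map]
    rfl
  have hFK : ∀ q ∈ F, q.1 ∉ K := by
    intro q hq
    have := List.of_mem_filter hq
    simpa using this
  have hFnd : (F.map Prod.fst).Nodup := by
    have hsub := List.filter_sublist (l := c.items) (p := fun q => !K.contains q.1)
    exact (hsub.map Prod.fst).nodup hcnd
  have hLnd : (L.map Prod.fst).Nodup := by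
    rw [hLkeys]
    refine List.Nodup.append hnd hFnd (List.disjoint_left.mpr ?_)
    intro a haK haF
    obtain ⟨q, hq, rfl⟩ := List.mem_map.mp haF
    exact hFK q hq haK
  have hLndk : (PySem.Dict.mk L).keys.Nodup := by rw [hkeysL]; exact hLnd
  have hgetc' : PySem.Dict.getD (c.modify r 0 (· + 1)) r 0 = c.getD r 0 + 1 :=
    PySem.Dict.getD_modify_self c r 0 _
  have hgetc'ne : ∀ s : String, s ≠ r → PySem.Dict.getD (c.modify r 0 (· + 1)) s 0 = c.getD s 0 :=
    fun s hs => PySem.Dict.getD_modify_of_ne c 0 _ hs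
  rw [hAppc]
  by_cases hrK : r ∈ K
  · -- r is a key of resultDict
    obtain ⟨p₀, hp₀, hp₀r⟩ := List.mem_map.mp hrK
    have hcont : PySem.Dict.contains (PySem.Dict.mk L) r = true := by
      rw [PySem.Dict.contains_iff_mem_keys, hkeysL, hLkeys]
      exact List.mem_append_left _ hrK
    have hmemL : (r, (pvUpd i c p₀).2) ∈ L := by
      rw [hLdef]
      apply List.mem_append_left
      rw [show (r, (pvUpd i c p₀).2) = pvUpd i c p₀ by rw [← hp₀r]; rfl]
      exact List.mem_map_of_mem hp₀
    have hget : (PySem.Dict.mk L).getD r [] = (pvUpd i c p₀).2 := by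
      have := PySem.Dict.get?_of_mem_items (PySem.Dict.mk L) hmemL hLndk
      simp [PySem.Dict.getD, this]
    unfold pvStepA
    rw [if_pos hcont]
    show (PySem.Dict.insert (PySem.Dict.mk L) r
        ((fun v => PySem.List.pySetD v i (PySem.List.pyGetD v i 0 + 1))
          (PySem.Dict.getD (PySem.Dict.mk L) r []))).items
      = pvApplyB (c.modify r 0 (· + 1)) rd i
    rw [hget]
    rw [PySem.Dict.items_insert_of_contains _ _ hcont]
    rw [hApp (c.modify r 0 (· + 1))]
    have hF' : (c.modify r 0 (· + 1)).items.filter (fun q => !K.contains q.1) = F := by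
      have hPr : (!K.contains r) = false := by simpa using hrK
      simp only [PySem.Dict.modify]
      by_cases hcr : c.contains r = true
      · rw [PySem.Dict.items_insert_of_contains _ _ hcr,
          pv_filter_map_comm c.items (fun s => !K.contains s) r (c.getD r 0 + 1), hFdef.symm]
        refine (List.map_congr_left ?_).trans (List.map_id F)
        intro q hq
        have : q.1 ≠ r := by
          intro he; exact hFK q hq (he ▸ hrK)
        simp [this]
      · rw [PySem.Dict.items_insert_of_not_contains _ _ (by simpa using hcr), List.filter_append,
          List.filter_singleton]
        rw [show (!K.contains (r, c.getD r 0 + 1).1) = false from hPr]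
        rw [Bool.cond_false, List.append_nil]
    rw [hF']
    rw [hLdef, List.map_append, List.map_map, List.map_map]
    have hIR := hin p₀ hp₀ hp₀r
    have hn1 : c.getD r 0 + 1 ≠ 0 := by omega
    have hv : PySem.List.pySetD (pvUpd i c p₀).2 i (PySem.List.pyGetD (pvUpd i c p₀).2 i 0 + 1)
        = PySem.List.pySetD p₀.2 i (PySem.List.pyGetD p₀.2 i 0 + (c.getD r 0 + 1)) := by
      unfold pvUpd
      rw [hp₀r]
      by_cases hn : c.getD r 0 = 0
      · simp only [hn]
        norm_num
      · rw [if_pos (show c.getD r 0 ≠ 0 from hn)]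
        dsimp only
        rw [pv_get_set p₀.2 i hIR, pv_set_set p₀.2 i hIR, add_assoc]
    congr 1
    · apply List.map_congr_left
      intro p hp
      dsimp only [Function.comp]
      by_cases hpr : p.1 = r
      · have hpp : p = p₀ := pv_key_inj rd hnd p hp p₀ hp₀ (by rw [hpr, hp₀r])
        subst hpp
        rw [if_pos (show ((pvUpd i c p).1 == r) = true by simpa [pvUpd] using hpr), hv]
        unfold pvUpd
        rw [hpr, hgetc', if_pos hn1]
      · rw [if_neg (show ¬ ((pvUpd i c p).1 == r) = true by simpa [pvUpd] using hpr)]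
        unfold pvUpd
        rw [hgetc'ne p.1 hpr]
    · apply List.map_congr_left
      intro q hq
      have hqr : q.1 ≠ r := fun he => hFK q hq (he ▸ hrK)
      dsimp only [Function.comp]
      rw [if_neg (show ¬ ((row q).1 == r) = true by simpa [hrowdef] using hqr)]
  · -- r is not a key of resultDict
    have hIR : PySem.Raise.InRange 21 i := hout hrK
    have hIR' : PySem.Raise.InRange (List.replicate 21 (0:Int)).length i := by simpa using hIR
    have hPr : (!K.contains r) = true := by simpa using hrK
    by_cases hcr : c.contains r = true
    · -- r was already seen in filteredResults: a stored row exists in the appended part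
      obtain ⟨v₀, hv₀⟩ : ∃ v, c.get? r = some v := by
        cases h : c.get? r with
        | some v => exact ⟨v, rfl⟩
        | none =>
          exfalso
          have hco := PySem.Dict.contains_eq_isSome_get? (d := c) (k := r)
          rw [h] at hco
          simp [hco] at hcr
      have hn0 : c.getD r 0 = v₀ := by simp [PySem.Dict.getD, hv₀]
      have hmemc : (r, v₀) ∈ c.items := PySem.Dict.mem_items_of_get?_eq_some _ hv₀
      have hmemF : (r, v₀) ∈ F := by
        rw [hFdef]
        exact List.mem_filter.mpr ⟨hmemc, by simpa using hrK⟩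
      have hmemL : (r, PySem.List.pySetD (List.replicate 21 0) i v₀) ∈ L := by
        rw [hLdef]
        exact List.mem_append_right _ (List.mem_map_of_mem hmemF)
      have hcont : PySem.Dict.contains (PySem.Dict.mk L) r = true := by
        rw [PySem.Dict.contains_iff_mem_keys, hkeysL]
        exact List.mem_map_of_mem hmemL
      have hget : (PySem.Dict.mk L).getD r [] = PySem.List.pySetD (List.replicate 21 0) i v₀ := by
        have := PySem.Dict.get?_of_mem_items (PySem.Dict.mk L) hmemL hLndk
        simp [PySem.Dict.getD, this]
      unfold pvStepA
      rw [if_pos hcont]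
      show (PySem.Dict.insert (PySem.Dict.mk L) r
          ((fun v => PySem.List.pySetD v i (PySem.List.pyGetD v i 0 + 1))
            (PySem.Dict.getD (PySem.Dict.mk L) r []))).items
        = pvApplyB (c.modify r 0 (· + 1)) rd i
      rw [hget]
      rw [PySem.Dict.items_insert_of_contains _ _ hcont]
      rw [hApp (c.modify r 0 (· + 1))]
      have hval : PySem.List.pySetD (PySem.List.pySetD (List.replicate 21 0) i v₀) i
          (PySem.List.pyGetD (PySem.List.pySetD (List.replicate 21 0) i v₀) i 0 + 1)
          = PySem.List.pySetD (List.replicate 21 0) i (v₀ + 1) := by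
        rw [pv_get_set _ _ hIR', pv_set_set _ _ hIR']
      have hF' : (c.modify r 0 (· + 1)).items.filter (fun q => !K.contains q.1)
          = F.map (fun q => if q.1 == r then (r, v₀ + 1) else q) := by
        simp only [PySem.Dict.modify]
        rw [hn0, PySem.Dict.items_insert_of_contains _ _ hcr,
          pv_filter_map_comm c.items (fun s => !K.contains s) r (v₀ + 1), hFdef.symm]
      rw [hF']
      rw [hLdef, List.map_append, List.map_map, List.map_map, List.map_map]
      congr 1
      · apply List.map_congr_left
        intro p hp
        have hpr : p.1 ≠ r := fun he => hrK (he ▸ List.mem_map_of_mem hp)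
        dsimp only [Function.comp]
        rw [if_neg (show ¬ ((pvUpd i c p).1 == r) = true by simpa [pvUpd] using hpr)]
        unfold pvUpd
        rw [hgetc'ne p.1 hpr]
      · apply List.map_congr_left
        intro q hq
        dsimp only [Function.comp]
        by_cases hqr : q.1 = r
        · have hqn : q = (r, v₀) :=
            pv_key_inj c.items hcnd q (List.mem_of_mem_filter hq) (r, v₀) hmemc (by simpa using hqr)
          rw [hqn]
          rw [if_pos (show ((row (r, v₀)).1 == r) = true by simp [hrowdef]), if_pos (by simp)]
          rw [show row (r, v₀ + 1) = (r, PySem.List.pySetD (List.replicate 21 0) i (v₀ + 1)) from rfl]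
          rw [hval]
        · rw [if_neg (show ¬ ((row q).1 == r) = true by simpa [hrowdef] using hqr),
            if_neg (by simpa using hqr)]
    · -- r entirely fresh: a new 21-zero row is appended
      have hrC : r ∉ c.items.map Prod.fst := by
        intro hmem
        exact absurd ((PySem.Dict.contains_iff_mem_keys c r).mpr hmem) hcr
      have hnotL : r ∉ L.map Prod.fst := by
        rw [hLkeys]
        intro hmem
        rcases List.mem_append.mp hmem with h | h
        · exact hrK h
        · obtain ⟨q, hq, rfl⟩ := List.mem_map.mp h
          exact hrC (List.mem_map_of_mem (List.mem_of_mem_filter hq))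
      have hcontL : PySem.Dict.contains (PySem.Dict.mk L) r = false := by
        rw [← Bool.not_eq_true, PySem.Dict.contains_iff_mem_keys, hkeysL]
        exact hnotL
      unfold pvStepA
      rw [if_neg (by simp [hcontL])]
      show (PySem.Dict.insert
          (PySem.Dict.insert (PySem.Dict.mk L) r [0,0,0,0,0,0,0,0,0,0,0,0,0,0,0,0,0,0,0,0,0]) r
          ((fun v => PySem.List.pySetD v i (PySem.List.pyGetD v i 0 + 1))
            (PySem.Dict.getD
              (PySem.Dict.insert (PySem.Dict.mk L) r [0,0,0,0,0,0,0,0,0,0,0,0,0,0,0,0,0,0,0,0,0])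
              r []))).items
        = pvApplyB (c.modify r 0 (· + 1)) rd i
      have hd₁ : (PySem.Dict.insert (PySem.Dict.mk L) r
            [0,0,0,0,0,0,0,0,0,0,0,0,0,0,0,0,0,0,0,0,0]).items
          = L ++ [(r, [0,0,0,0,0,0,0,0,0,0,0,0,0,0,0,0,0,0,0,0,0])] :=
        PySem.Dict.items_insert_of_not_contains _ _ hcontL
      have hknd₁ : (PySem.Dict.insert (PySem.Dict.mk L) r
            [0,0,0,0,0,0,0,0,0,0,0,0,0,0,0,0,0,0,0,0,0]).keys.Nodup := by
        show ((PySem.Dict.insert (PySem.Dict.mk L) r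
            [0,0,0,0,0,0,0,0,0,0,0,0,0,0,0,0,0,0,0,0,0]).items.map Prod.fst).Nodup
        rw [hd₁, List.map_append]
        refine List.Nodup.append hLnd (by simp) ?_
        intro a haL haR
        simp only [List.map_cons, List.map_nil, List.mem_singleton] at haR
        subst haR
        exact hnotL haL
      have hmem₁ : (r, [0,0,0,0,0,0,0,0,0,0,0,0,0,0,0,0,0,0,0,0,0]) ∈
          (PySem.Dict.insert (PySem.Dict.mk L) r
            [0,0,0,0,0,0,0,0,0,0,0,0,0,0,0,0,0,0,0,0,0]).items := by
        rw [hd₁]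
        exact List.mem_append_right _ (List.mem_singleton.mpr rfl)
      have hget₁ : (PySem.Dict.insert (PySem.Dict.mk L) r
            [0,0,0,0,0,0,0,0,0,0,0,0,0,0,0,0,0,0,0,0,0]).getD r []
          = [0,0,0,0,0,0,0,0,0,0,0,0,0,0,0,0,0,0,0,0,0] := by
        have := PySem.Dict.get?_of_mem_items _ hmem₁ hknd₁
        simp [PySem.Dict.getD, this]
      have hcont₁ : (PySem.Dict.insert (PySem.Dict.mk L) r
            [0,0,0,0,0,0,0,0,0,0,0,0,0,0,0,0,0,0,0,0,0]).contains r = true := by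
        rw [PySem.Dict.contains_iff_mem_keys]
        exact List.mem_map_of_mem hmem₁
      rw [hget₁, PySem.Dict.items_insert_of_contains _ _ hcont₁, hd₁, List.map_append]
      have hLid : L.map (fun p => if (p.1 == r) = true
          then (r, PySem.List.pySetD [0,0,0,0,0,0,0,0,0,0,0,0,0,0,0,0,0,0,0,0,0] i
            (PySem.List.pyGetD [0,0,0,0,0,0,0,0,0,0,0,0,0,0,0,0,0,0,0,0,0] i 0 + 1)) else p)
          = L := by
        refine (List.map_congr_left ?_).trans (List.map_id L)
        intro p hp
        have : p.1 ≠ r := fun he => hnotL (he ▸ List.mem_map_of_mem hp)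
        simp [this]
      rw [hLid]
      have hzrepl : ([0,0,0,0,0,0,0,0,0,0,0,0,0,0,0,0,0,0,0,0,0] : List Int)
          = List.replicate 21 0 := rfl
      have hgc0 : c.getD r 0 = 0 :=
        PySem.Dict.getD_of_not_contains c 0 (by simpa using hcr)
      rw [hApp (c.modify r 0 (· + 1))]
      have hF' : (c.modify r 0 (· + 1)).items.filter (fun q => !K.contains q.1)
          = F ++ [(r, (0:Int) + 1)] := by
        simp only [PySem.Dict.modify]
        rw [hgc0, PySem.Dict.items_insert_of_not_contains _ _ (by simpa using hcr),
          List.filter_append, List.filter_singleton]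
        rw [show (!K.contains (r, (0:Int) + 1).1) = true from hPr, Bool.cond_true, hFdef.symm]
      rw [hF', List.map_append]
      have hrow1 : [(r, (0:Int) + 1)].map row
          = [(r, PySem.List.pySetD (List.replicate 21 0) i (0 + 1))] := rfl
      rw [hrow1]
      have hupd : rd.map (pvUpd i (c.modify r 0 (· + 1))) = rd.map (pvUpd i c) := by
        apply List.map_congr_left
        intro p hp
        have hpr : p.1 ≠ r := fun he => hrK (he ▸ List.mem_map_of_mem hp)
        unfold pvUpd
        rw [hgetc'ne p.1 hpr]
      rw [hupd]
      rw [hzrepl]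
      simp only [List.map_cons, List.map_nil, beq_self_eq_true, if_true]
      rw [pv_get_zeros i hIR, hLdef, List.append_assoc]


theorem pv_main (rd : List (String × List Int)) (i : Int)
    (hnd : (rd.map Prod.fst).Nodup) :
    ∀ fr : List String,
      (∀ p ∈ rd, p.1 ∈ fr → PySem.Raise.InRange p.2.length i) →
      (∀ r ∈ fr, r ∉ rd.map Prod.fst → PySem.Raise.InRange 21 i) →
      (fr.foldl (pvStepA i) (PySem.Dict.mk rd)).items = pvApplyB (PySem.Dict.counter fr) rd i := by
  intro fr
  induction fr using List.reverseRecOn with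
  | nil =>
    intro _ _
    rw [show PySem.Dict.counter ([] : List String) = PySem.Dict.empty from rfl]
    unfold pvApplyB
    rw [pvPhase2_eq _ rd i hnd]
    simp only [PySem.Dict.empty]
    have h1 : ∀ p : String × List Int, pvUpd i (PySem.Dict.mk []) p = p := by
      intro p
      simp [pvUpd, PySem.Dict.getD, PySem.Dict.get?]
    rw [List.map_congr_left (fun p _ => h1 p)]
    simp
  | append_singleton fr r ih =>
    intro hin hout
    rw [List.foldl_append, List.foldl_cons, List.foldl_nil]
    have hih := ih (fun p hp hm => hin p hp (List.mem_append_left _ hm))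
      (fun s hs => hout s (List.mem_append_left _ hs))
    have hd : fr.foldl (pvStepA i) (PySem.Dict.mk rd)
        = PySem.Dict.mk (pvApplyB (PySem.Dict.counter fr) rd i) := PySem.Dict.ext hih
    rw [hd]
    rw [pv_step (PySem.Dict.counter fr) rd i r hnd (PySem.Dict.nodup_keys_counter fr)
      (by rw [PySem.Dict.getD_counter]; exact Int.natCast_nonneg _)
      (fun p hp he => hin p hp (he ▸ List.mem_append_right _ (List.mem_singleton.mpr rfl)))
      (fun h => hout r (List.mem_append_right _ (List.mem_singleton.mpr rfl)) h)]
    rw [← PySem.Dict.counter_append_singleton]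

-- ===== VERDICT (by name: the statement is the Claim_ definition above) =====
theorem addFilteredOrgsToDict_spec : Claim_equal_addFilteredOrgsToDict := by
  intro fr rd i _ hpre
  obtain ⟨hnd, hin, hout⟩ := hpre
  unfold Spec_addFilteredOrgsToDict
  have hA : addFilteredOrgsToDict fr rd i = (fr.foldl (pvStepA i) (PySem.Dict.mk rd)).items := rfl
  have hB : addFilteredOrgsToDict_alt fr rd i = pvApplyB (PySem.Dict.counter fr) rd i := by
    unfold addFilteredOrgsToDict_alt pvApplyB
    rw [PySem.Dict.foldl_insert_getD_add_one_eq_counter]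
  rw [hA, hB, pv_main rd i hnd fr hin hout]
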